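-- pv_equiv track=rewrite | github.com/Shazzad-Shaon3404/Website_AMPRNNpro | mai.py | answer
-- ===== SOURCE A (Python) =====
-- def answer(data):
--
--
--       output_ans = []
--       for col_idx, column in enumerate(zip(*data)):
--           zero_count = column.count(0)
--           one_count = column.count(1)
--
--           if zero_count > 6:
--               output_ans.append("negative")
--
--           else:
--               output_ans.append("positive")
--
--       return list(output_ans)
-- ===== SOURCE B (Python) =====
-- def answer(data):
--     ncols = min((len(r) for r in data), default=0)
--
--     def vec(rows):
--         # divide and conquer: indicator vector at a single row, elementwise sum of halves
--         if len(rows) <= 1: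
--             r = rows[0]
--             return [1 if r[j] == 0 else 0 for j in range(ncols)]
--         mid = len(rows) // 2
--         return [x + y for x, y in zip(vec(rows[:mid]), vec(rows[mid:]))]
--
--     counts = vec(data) if data else []
--     return ["negative" if c > 6 else "positive" for c in counts]
-- ===== Notes on version B (the rewrite author's own statement) =====
-- stated objective: alternative
-- what changed: Replaces A's transpose (zip(*data)) with per-column count scans by a divide-and-conquer over the row list: per-row zero-indicator vectors at the leaves, merged by elementwise vector addition, then thresholded.
import Mathlib
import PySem

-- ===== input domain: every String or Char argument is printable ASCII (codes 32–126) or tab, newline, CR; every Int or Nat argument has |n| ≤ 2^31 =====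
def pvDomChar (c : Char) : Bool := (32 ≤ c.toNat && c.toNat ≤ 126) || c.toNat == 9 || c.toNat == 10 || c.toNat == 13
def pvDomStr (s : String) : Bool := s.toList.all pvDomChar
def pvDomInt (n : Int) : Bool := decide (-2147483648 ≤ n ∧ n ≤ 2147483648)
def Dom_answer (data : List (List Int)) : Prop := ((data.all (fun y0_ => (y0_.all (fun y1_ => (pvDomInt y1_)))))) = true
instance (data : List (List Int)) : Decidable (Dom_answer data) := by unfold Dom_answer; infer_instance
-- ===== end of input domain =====

-- B replaces A's transpose (zip(*data)) + per-column count scans by a divide-and-conquer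
-- on the row list (indicator vectors merged by elementwise addition); same cost,
-- different algorithm structure.

-- ===== PORT A =====
-- zip(*data): emit the tuple of heads while every row is nonempty, then recurse on tails
def pyZip (rows : List (List Int)) : List (List Int) :=
  if _h : rows = [] ∨ rows.any (·.isEmpty) then []
  else (rows.map (·.headD 0)) :: pyZip (rows.map (·.tail))
termination_by (rows.headD []).length
decreasing_by
  rw [not_or] at _h
  obtain ⟨hne, hall⟩ := _h
  cases rows with
  | nil => exact absurd rfl hne
  | cons r rs =>
    have hr : ¬ r.isEmpty := by
      intro hre
      exact hall (by simp [List.any_cons, hre])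
    cases r with
    | nil => simp at hr
    | cons a t => simp

def answer (data : List (List Int)) : List String :=
  (pyZip data).foldl
    (fun output_ans column =>
      let zero_count := column.count 0
      let _one_count := column.count 1
      if zero_count > 6 then output_ans ++ ["negative"] else output_ans ++ ["positive"])
    []

-- ===== PORT B =====
-- ncols = min(len(r) for r in data) with default 0
def minRowLen (data : List (List Int)) : Nat :=
  match data with
  | [] => 0
  | r :: rs => rs.foldl (fun m r' => min m r'.length) r.length

-- vec(rows): Python's inner divide-and-conquer; Python tests len(rows) <= 1 and indexes
-- rows[0] (never called on []; the [] => [] arm only makes the Lean recursion total)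
def vec (ncols : Nat) (rows : List (List Int)) : List Nat :=
  if h : rows.length ≤ 1 then
    match rows with
    | [] => []
    | r :: _ => (List.range ncols).map (fun j => if r.getD j 0 = 0 then 1 else 0)
  else
    List.zipWith (· + ·) (vec ncols (rows.take (rows.length / 2)))
      (vec ncols (rows.drop (rows.length / 2)))
termination_by rows.length
decreasing_by
  · simp only [List.length_take]; omega
  · simp only [List.length_drop]; omega

def answer_alt (data : List (List Int)) : List String :=
  (if data.isEmpty then [] else vec (minRowLen data) data).map
    (fun c => if c > 6 then "negative" else "positive")

-- ===== PRECONDITION & SPEC =====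
def Spec_answer (data : List (List Int)) (out : List String) : Prop := out = answer_alt data
instance (data : List (List Int)) (out : List String) : Decidable (Spec_answer data out) := by unfold Spec_answer; infer_instance

-- ===== CLAIM (what is proved, stated in full; the proofs are below) =====
def Claim_equal_answer : Prop := ∀ (data : List (List Int)), Dom_answer data → Spec_answer data (answer data)

-- ===== LEMMAS AND PROOFS =====

theorem one_le_length_of_ne_nil (r : List Int) (hr : r ≠ []) : 1 ≤ r.length := by
  obtain ⟨a, t, rfl⟩ := List.exists_cons_of_ne_nil hr
  simp

theorem headD_eq_getD (r : List Int) : r.headD 0 = r.getD 0 0 := by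
  cases r <;> rfl

theorem tail_getD (r : List Int) (j : Nat) :
    r.tail.getD j 0 = r.getD (j + 1) 0 := by
  cases r <;> rfl

theorem tail_length (r : List Int) : r.tail.length = r.length - 1 := by
  cases r <;> simp

theorem foldl_min_le_init (rs : List (List Int)) (a : Nat) :
    rs.foldl (fun m r' => min m r'.length) a ≤ a := by
  induction rs generalizing a with
  | nil => simp
  | cons r rs ih => exact le_trans (ih _) (Nat.min_le_left _ _)

theorem foldl_min_le_mem (rs : List (List Int)) (a : Nat) (r : List Int) (hr : r ∈ rs) :
    rs.foldl (fun m r' => min m r'.length) a ≤ r.length := by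
  induction rs generalizing a with
  | nil => simp at hr
  | cons r0 rs ih =>
    simp only [List.foldl_cons]
    rcases List.mem_cons.mp hr with rfl | hmem
    · exact le_trans (foldl_min_le_init rs _) (Nat.min_le_right _ _)
    · exact ih _ hmem

theorem foldl_min_pos (rs : List (List Int)) (a : Nat) (ha : 1 ≤ a)
    (h : ∀ r ∈ rs, r ≠ []) :
    1 ≤ rs.foldl (fun m r' => min m r'.length) a := by
  induction rs generalizing a with
  | nil => simpa
  | cons r rs ih =>
    simp only [List.foldl_cons]
    exact ih (min a r.length)
      (le_min ha (one_le_length_of_ne_nil r (h r (by simp))))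
      (fun r' hr' => h r' (by simp [hr']))

theorem foldl_min_tail (rs : List (List Int)) (a : Nat) (ha : 1 ≤ a)
    (h : ∀ r ∈ rs, r ≠ []) :
    (rs.map (·.tail)).foldl (fun m r' => min m r'.length) (a - 1)
      = rs.foldl (fun m r' => min m r'.length) a - 1 := by
  induction rs generalizing a with
  | nil => simp
  | cons r rs ih =>
    have h1 : 1 ≤ r.length := one_le_length_of_ne_nil r (h r (by simp))
    have hmin : min (a - 1) r.tail.length = min a r.length - 1 := by
      rw [tail_length]; omega
    simp only [List.map_cons, List.foldl_cons, hmin]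
    exact ih (min a r.length) (le_min ha h1) (fun r' hr' => h r' (by simp [hr']))

theorem minRowLen_eq_zero (data : List (List Int)) (h : ([] : List Int) ∈ data) :
    minRowLen data = 0 := by
  cases data with
  | nil => simp at h
  | cons r0 rs =>
    simp only [minRowLen]
    rcases List.mem_cons.mp h with h0 | hmem
    · rw [← h0]
      have hle := foldl_min_le_init rs ([] : List Int).length
      simp at hle ⊢
      omega
    · have := foldl_min_le_mem rs r0.length [] hmem
      simpa using this

theorem cols_succ (data : List (List Int)) (m : Nat) :
    data.map (fun r => r.headD 0)
        :: (List.range m).map (fun j => (data.map (·.tail)).map (fun r => r.getD j 0))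
      = (List.range (m + 1)).map (fun j => data.map (fun r => r.getD j 0)) := by
  rw [List.range_succ_eq_map, List.map_cons, List.map_map]
  congr 1
  · exact List.map_congr_left (fun r _ => headD_eq_getD r)
  · apply List.map_congr_left
    intro j _
    simp only [Function.comp_apply, List.map_map]
    exact List.map_congr_left (fun r _ => tail_getD r j)

theorem zip_char (data : List (List Int)) :
    pyZip data
      = (List.range (minRowLen data)).map (fun j => data.map (fun r => r.getD j 0)) := by
  by_cases h : data = [] ∨ data.any (·.isEmpty)
  · rw [pyZip, dif_pos h]
    rcases h with rfl | h
    · rfl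
    · obtain ⟨r, hr, hre⟩ := List.any_eq_true.mp h
      rw [minRowLen_eq_zero data (by simpa [List.isEmpty_iff.mp (by simpa using hre)] using hr)]
      rfl
  · rw [pyZip, dif_neg h]
    rw [not_or] at h
    obtain ⟨hne, hall⟩ := h
    have hnz : ∀ r ∈ data, r ≠ [] := by
      intro r hr hre
      exact hall (List.any_eq_true.mpr ⟨r, hr, by simp [hre]⟩)
    obtain ⟨r0, rs, rfl⟩ := List.exists_cons_of_ne_nil hne
    have hr0 : r0 ≠ [] := hnz r0 (by simp)
    have h1 : 1 ≤ r0.length := one_le_length_of_ne_nil r0 hr0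
    have hpos : 1 ≤ minRowLen (r0 :: rs) :=
      foldl_min_pos rs r0.length h1 (fun r hr => hnz r (by simp [hr]))
    have htail : minRowLen ((r0 :: rs).map (·.tail)) = minRowLen (r0 :: rs) - 1 := by
      simp only [List.map_cons, minRowLen, tail_length]
      exact foldl_min_tail rs r0.length h1 (fun r hr => hnz r (by simp [hr]))
    rw [zip_char ((r0 :: rs).map (·.tail)), htail]
    obtain ⟨m, hm⟩ : ∃ m, minRowLen (r0 :: rs) = m + 1 :=
      ⟨minRowLen (r0 :: rs) - 1, by omega⟩
    rw [hm, Nat.add_sub_cancel]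
    exact cols_succ (r0 :: rs) m
termination_by (data.headD []).length
decreasing_by
  simp only [List.map_cons, List.headD_cons, tail_length]
  have hd : data = r0 :: rs := by assumption
  rw [hd, List.headD_cons]
  omega

theorem zipWith_add_map_range (n : Nat) (f g : Nat → Nat) :
    List.zipWith (· + ·) ((List.range n).map f) ((List.range n).map g)
      = (List.range n).map (fun j => f j + g j) := by
  induction n with
  | zero => simp
  | succ n ih =>
    rw [List.range_succ, List.map_append, List.map_append,
        List.zipWith_append (by simp), ih]
    simp

-- the divide-and-conquer vector equals the per-column zero counts
theorem vec_char (ncols : Nat) (rows : List (List Int)) (h : rows ≠ []) :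
    vec ncols rows
      = (List.range ncols).map (fun j => (rows.map (fun r => r.getD j 0)).count 0) := by
  by_cases h1 : rows.length ≤ 1
  · obtain ⟨r, rs, rfl⟩ := List.exists_cons_of_ne_nil h
    have : rs = [] := by
      cases rs with
      | nil => rfl
      | cons a t => simp at h1
    subst this
    rw [vec, dif_pos (by simp)]
    apply List.map_congr_left
    intro j _
    simp [List.count_cons]
  · rw [vec, dif_neg h1]
    have hlen : 2 ≤ rows.length := by omega
    have hmid1 : 1 ≤ rows.length / 2 := by omega
    have hmid2 : rows.length / 2 < rows.length := by omega
    have htake : rows.take (rows.length / 2) ≠ [] := by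
      intro he
      rcases List.take_eq_nil_iff.mp he with h0 | h0
      · omega
      · exact h h0
    have hdrop : rows.drop (rows.length / 2) ≠ [] := by
      intro he
      have := List.drop_eq_nil_iff.mp he
      omega
    rw [vec_char ncols (rows.take (rows.length / 2)) htake,
        vec_char ncols (rows.drop (rows.length / 2)) hdrop,
        zipWith_add_map_range]
    apply List.map_congr_left
    intro j _
    conv_rhs => rw [← List.take_append_drop (rows.length / 2) rows]
    rw [List.map_append, List.count_append]
termination_by rows.length
decreasing_by
  · simp only [List.length_take]; omega
  · simp only [List.length_drop]; omega

theorem foldl_label (l : List (List Int)) (acc : List String) :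
    l.foldl
        (fun out column =>
          if column.count 0 > 6 then out ++ ["negative"] else out ++ ["positive"])
        acc
      = acc ++ l.map (fun column =>
          if column.count 0 > 6 then "negative" else "positive") := by
  induction l generalizing acc with
  | nil => simp
  | cons c l ih =>
    simp only [List.foldl_cons, List.map_cons]
    by_cases h : c.count 0 > 6 <;> simp [h, ih]

-- ===== VERDICT (by name: the statement is the Claim_ definition above) =====
theorem answer_spec : Claim_equal_answer := by
  intro data _
  unfold Spec_answer answer answer_alt
  rw [foldl_label, zip_char]
  cases data with
  | nil => rfl
  | cons r rs =>
    rw [List.isEmpty_cons, if_neg (by simp)]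
    rw [vec_char (minRowLen (r :: rs)) (r :: rs) (by simp)]
    simp [List.map_map]
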